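-- pv_equiv track=rewrite | github.com/YiyanYang0728/MultiCAST_guide_predictor | MultiCAST_guide_predictor.py | max_run_length
-- ===== SOURCE A (Python) =====
-- def max_run_length(seq: str, base: str | None = None) -> int:
--     s = seq.upper()
--     maxlen, cur = 0, 0
--     last = None
--     for ch in s:
--         if base is None:
--             if ch == last:
--                 cur += 1
--             else:
--                 cur = 1
--             last = ch
--         else:
--             if ch == base:
--                 cur += 1
--             else:
--                 cur = 0
--         maxlen = max(maxlen, cur)
--     return maxlen
-- ===== SOURCE B (Python) =====
-- def _runs(s):
--     runs = []
--     i, n = 0, len(s)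
--     while i < n:
--         j = i
--         while j < n and s[j] == s[i]:
--             j += 1
--         runs.append((s[i], j - i))
--         i = j
--     return runs
--
-- def max_run_length(seq, base=None):
--     s = seq.upper()
--     rs = _runs(s)
--     if base is None:
--         return max((n for _, n in rs), default=0)
--     return max((n for c, n in rs if c == base), default=0)
-- ===== Notes on version B (the rewrite author's own statement) =====
-- stated objective: alternative
-- what changed: A's single running-counter pass (maxlen/cur/last state) is replaced by building the list of maximal equal-character runs first and then taking max over run lengths (all runs, or those whose character equals base), with default 0.
import Mathlib
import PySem

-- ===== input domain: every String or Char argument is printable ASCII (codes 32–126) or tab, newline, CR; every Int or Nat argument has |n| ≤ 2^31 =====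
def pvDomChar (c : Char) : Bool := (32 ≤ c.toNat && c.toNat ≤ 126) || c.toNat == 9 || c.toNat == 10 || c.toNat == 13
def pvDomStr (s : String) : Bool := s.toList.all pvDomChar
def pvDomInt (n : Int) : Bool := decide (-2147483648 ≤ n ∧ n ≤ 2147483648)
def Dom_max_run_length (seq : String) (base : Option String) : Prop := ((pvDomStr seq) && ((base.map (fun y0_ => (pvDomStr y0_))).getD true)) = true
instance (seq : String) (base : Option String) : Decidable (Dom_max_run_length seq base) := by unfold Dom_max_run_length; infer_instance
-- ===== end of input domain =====

-- B replaces A's inline running-counter pass by a build-maximal-runs-then-reduce decomposition (alternative structure, same cost).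


-- ===== PORT A =====
-- literal transliteration of A: one fold over the uppercased characters with state (maxlen, cur, last)
def max_run_length (seq : String) (base : Option String) : Int :=
  let s := (PySem.Str.upper seq).toList
  let r := s.foldl (fun (st : Int × Int × Option Char) ch =>
    match base with
    | none =>
      let cur := if some ch = st.2.2 then st.2.1 + 1 else 1
      (max st.1 cur, cur, some ch)
    | some b =>
      let cur := if String.ofList [ch] = b then st.2.1 + 1 else 0
      (max st.1 cur, cur, st.2.2)) (0, 0, none)
  r.1

-- ===== PORT B =====
-- B's helper _runs: split the character list into maximal runs (char, length); the inner
-- index scan `while j < n and s[j] == s[i]` is the takeWhile/dropWhile split.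
def pvRuns : List Char → List (Char × Nat)
  | [] => []
  | c :: cs =>
    (c, (cs.takeWhile (· == c)).length + 1) :: pvRuns (cs.dropWhile (· == c))
termination_by l => l.length
decreasing_by
  exact Nat.lt_succ_of_le (cs.length_dropWhile_le (· == c))

-- max(…, default=0) over the run lengths (all of them, or those whose char equals base)
def max_run_length_alt (seq : String) (base : Option String) : Int :=
  let rs := pvRuns (PySem.Str.upper seq).toList
  match base with
  | none => rs.foldl (fun m p => max m (p.2 : Int)) 0
  | some b => rs.foldl (fun m p => if String.ofList [p.1] = b then max m (p.2 : Int) else m) 0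

-- ===== PRECONDITION & SPEC =====
def Spec_max_run_length (seq : String) (base : Option String) (out : Int) : Prop := out = max_run_length_alt seq base
instance (seq : String) (base : Option String) (out : Int) : Decidable (Spec_max_run_length seq base out) := by unfold Spec_max_run_length; infer_instance

-- ===== CLAIM (what is proved, stated in full; the proofs are below) =====
def Claim_equal_max_run_length : Prop := ∀ (seq : String) (base : Option String), Dom_max_run_length seq base → Spec_max_run_length seq base (max_run_length seq base)

-- ===== LEMMAS AND PROOFS =====

-- A's step function in the base = none mode
def pvStepN (st : Int × Int × Option Char) (ch : Char) : Int × Int × Option Char :=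
  let cur := if some ch = st.2.2 then st.2.1 + 1 else 1
  (max st.1 cur, cur, some ch)

-- A's step function in the base = some b mode
def pvStepB (b : String) (st : Int × Int × Option Char) (ch : Char) : Int × Int × Option Char :=
  let cur := if String.ofList [ch] = b then st.2.1 + 1 else 0
  (max st.1 cur, cur, st.2.2)

-- folding pvStepN over a block of characters all equal to c, starting with last = c
lemma pvBlockN (same : List Char) (c : Char) (h : ∀ x ∈ same, x = c) (m k : Int) (hmk : k ≤ m) :
    same.foldl pvStepN (m, k, some c) = (max m (k + same.length), k + same.length, some c) := by
  induction same generalizing m k with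
  | nil => simp; omega
  | cons x xs ih =>
    have hx : x = c := h x (by simp)
    subst hx
    simp only [List.foldl_cons, pvStepN, if_true]
    rw [ih (fun y hy => h y (by simp [hy])) (max m (k + 1)) (k + 1) (by omega)]
    simp only [List.length_cons, Prod.mk.injEq]
    refine ⟨by push_cast; omega, by push_cast; ring, trivial⟩

-- folding pvStepB over a block of characters all equal to c with String.ofList [c] = b
lemma pvBlockBpos (b : String) (same : List Char) (c : Char) (h : ∀ x ∈ same, x = c)
    (hb : String.ofList [c] = b) (m k : Int) (last : Option Char) (hmk : k ≤ m) :
    same.foldl (pvStepB b) (m, k, last) = (max m (k + same.length), k + same.length, last) := by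
  induction same generalizing m k with
  | nil => simp; omega
  | cons x xs ih =>
    have hx : x = c := h x (by simp)
    subst hx
    simp only [List.foldl_cons, pvStepB, if_pos hb]
    rw [ih (fun y hy => h y (by simp [hy])) (max m (k + 1)) (k + 1) (by omega)]
    simp only [List.length_cons, Prod.mk.injEq]
    refine ⟨by push_cast; omega, by push_cast; ring, trivial⟩

-- folding pvStepB over a block of characters all equal to c with String.ofList [c] ≠ b, cur already 0
lemma pvBlockBneg (b : String) (same : List Char) (c : Char) (h : ∀ x ∈ same, x = c)
    (hb : String.ofList [c] ≠ b) (m : Int) (last : Option Char) (hm : 0 ≤ m) :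
    same.foldl (pvStepB b) (m, 0, last) = (m, 0, last) := by
  induction same with
  | nil => rfl
  | cons x xs ih =>
    have hx : x = c := h x (by simp)
    subst hx
    simp only [List.foldl_cons, pvStepB, if_neg hb]
    rw [show max m 0 = m by omega]
    exact ih (fun y hy => h y (by simp [hy]))

lemma pvMkInj {c d : Char} (h : String.ofList [c] = String.ofList [d]) : c = d := by
  have := congrArg String.toList h
  simpa [String.toList_ofList] using this

lemma pvTakeEq (c : Char) (cs : List Char) : ∀ x ∈ cs.takeWhile (· == c), x = c := by
  intro x hx
  have := List.mem_takeWhile_imp hx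
  simpa using this

-- main invariant, base = none: A's fold from any legal block boundary equals B's reduce over runs
lemma pvMainN (l : List Char) : ∀ (m k : Int) (last : Option Char), k ≤ m →
    (∀ c, l.head? = some c → last ≠ some c) →
    (l.foldl pvStepN (m, k, last)).1 = (pvRuns l).foldl (fun m p => max m (p.2 : Int)) m := by
  induction l using pvRuns.induct with
  | case1 => intro m k last hmk _; simp [pvRuns]
  | case2 c cs ih =>
    intro m k last hmk hhead
    have hlast : ¬ (some c = last) := fun h => hhead c rfl h.symm
    have hsplit : cs = cs.takeWhile (· == c) ++ cs.dropWhile (· == c) :=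
      (List.takeWhile_append_dropWhile).symm
    conv_lhs => rw [hsplit]
    rw [List.foldl_cons, List.foldl_append]
    rw [show pvStepN (m, k, last) c = (max m 1, 1, some c) by
      simp [pvStepN, if_neg hlast]]
    rw [pvBlockN _ c (pvTakeEq c cs) _ 1 (by omega)]
    rw [ih (max (max m 1) (1 + (cs.takeWhile (· == c)).length)) (1 + (cs.takeWhile (· == c)).length)
      (some c) (by omega)
      (by
        intro d hd hcd
        have hpd := List.head?_dropWhile_not (· == c) cs
        rw [hd] at hpd
        have hdc : d ≠ c := by simpa using hpd
        exact hdc (Option.some.inj hcd).symm)]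
    rw [pvRuns]
    rw [List.foldl_cons]
    congr 1
    push_cast
    omega

-- main invariant, base = some b
lemma pvMainB (b : String) (l : List Char) : ∀ (m k : Int) (last : Option Char), 0 ≤ m → k ≤ m →
    (∀ c, l.head? = some c → String.ofList [c] = b → k = 0) →
    (l.foldl (pvStepB b) (m, k, last)).1 =
      (pvRuns l).foldl (fun m p => if String.ofList [p.1] = b then max m (p.2 : Int) else m) m := by
  induction l using pvRuns.induct with
  | case1 => intro m k last _ _ _; simp [pvRuns]
  | case2 c cs ih =>
    intro m k last hm hmk hhead
    have hsplit : cs = cs.takeWhile (· == c) ++ cs.dropWhile (· == c) :=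
      (List.takeWhile_append_dropWhile).symm
    conv_lhs => rw [hsplit]
    rw [List.foldl_cons, List.foldl_append]
    have hrest : ∀ d, (cs.dropWhile (· == c)).head? = some d → d ≠ c := by
      intro d hd
      have hpd := List.head?_dropWhile_not (· == c) cs
      rw [hd] at hpd
      simpa using hpd
    by_cases hcb : String.ofList [c] = b
    · have hk0 : k = 0 := hhead c rfl hcb
      subst hk0
      rw [show pvStepB b (m, 0, last) c = (max m 1, 1, last) by
        simp [pvStepB, if_pos hcb]]
      rw [pvBlockBpos b _ c (pvTakeEq c cs) hcb _ 1 last (by omega)]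
      rw [ih (max (max m 1) (1 + (cs.takeWhile (· == c)).length)) (1 + (cs.takeWhile (· == c)).length)
        last (by omega) (by omega)
        (fun d hd hdb => absurd (pvMkInj (hcb.trans hdb.symm)) (Ne.symm (hrest d hd)))]
      rw [pvRuns]
      rw [List.foldl_cons]
      simp only [if_pos hcb]
      congr 1
      push_cast
      omega
    · rw [show pvStepB b (m, k, last) c = (m, 0, last) by
        simp only [pvStepB, if_neg hcb]
        rw [show max m 0 = m by omega]]
      rw [pvBlockBneg b _ c (pvTakeEq c cs) hcb m last hm]
      rw [ih m 0 last hm hm (fun d hd hdb => rfl)]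
      rw [pvRuns]
      rw [List.foldl_cons]
      simp only [if_neg hcb]

-- ===== VERDICT (by name: the statement is the Claim_ definition above) =====
theorem max_run_length_spec : Claim_equal_max_run_length := by
  intro seq base _
  show max_run_length seq base = max_run_length_alt seq base
  unfold max_run_length max_run_length_alt
  cases base with
  | none =>
    simpa [pvStepN] using
      pvMainN (PySem.Str.upper seq).toList 0 0 none le_rfl (by intro c _ h; cases h)
  | some b =>
    simpa [pvStepB] using
      pvMainB b (PySem.Str.upper seq).toList 0 0 none le_rfl le_rfl (by intro c _ _; rfl)
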